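-- pv_equiv track=rewrite | github.com/ramanflorfresca/antar-fastapi | antar_engine/utils.py | zodiac_distance_inclusive
-- ===== SOURCE A (Python) =====
-- def zodiac_distance_inclusive(start, end, direction):
--     """
--     Inclusive distance: number of signs from start to end,
--     including both start and end, following the given direction.
--     If start == end, returns 1.
--     """
--     if start == end:
--         return 1
--     dist = 0
--     current = start
--     while True:
--         dist += 1
--         if current == end:
--             break
--         current = (current + direction) % 12
--     return dist
-- ===== SOURCE B (Python) =====
-- GCD12 = (12, 1, 2, 3, 4, 1, 6, 1, 4, 3, 2, 1)  # GCD12[d] == gcd(d, 12)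
--
-- def zd_closed(start, end, direction):
--     d = direction % 12
--     g = GCD12[d]
--     m = 12 // g
--     inv = pow(d // g, -1, m)
--     k = (end - start) // g * inv % m
--     return (k if k else m) + 1
--
-- def zodiac_distance_inclusive(start, end, direction):
--     """
--     Inclusive distance: number of signs from start to end,
--     including both start and end, following the given direction.
--     If start == end, returns 1.
--     """
--     if start == end:
--         return 1
--     return zd_closed(start, end, direction)
-- ===== Notes on version B (the rewrite author's own statement) =====
-- stated objective: alternative
-- what changed: Replaces A's step-by-step modular walk with a closed form: the minimal step count is computed by a modular inverse (pow(d//g,-1,m)) from the congruence k*direction = end-start (mod 12), no loop and no running current.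
import Mathlib
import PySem

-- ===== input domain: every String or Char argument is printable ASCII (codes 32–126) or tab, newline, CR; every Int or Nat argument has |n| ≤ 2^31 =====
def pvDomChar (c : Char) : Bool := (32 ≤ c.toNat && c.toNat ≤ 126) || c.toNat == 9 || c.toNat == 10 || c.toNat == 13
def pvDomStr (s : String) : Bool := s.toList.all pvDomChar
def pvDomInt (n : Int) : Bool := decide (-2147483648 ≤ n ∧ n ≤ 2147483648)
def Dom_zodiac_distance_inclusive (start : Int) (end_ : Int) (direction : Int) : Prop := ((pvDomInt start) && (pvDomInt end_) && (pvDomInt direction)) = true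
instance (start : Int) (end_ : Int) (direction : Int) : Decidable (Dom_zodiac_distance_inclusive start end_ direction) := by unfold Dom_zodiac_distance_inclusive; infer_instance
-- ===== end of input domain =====

-- B replaces A's step-by-step modular walk with a closed form (minimal step count via a modular inverse); return value only.


-- ===== PORT A =====
-- A's 'while True' loop; the fuel only makes the recursion total (13 suffices on Pre_,
-- where the loop breaks within 13 iterations); on fuel exhaustion (A diverges) it returns dist.
def zdLoop (end_ direction : Int) (dist current : Int) (fuel : Nat) : Int :=
  match fuel with
  | 0 => dist
  | fuel + 1 =>
    let dist := dist + 1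
    if current = end_ then dist
    else zdLoop end_ direction dist (PySem.Int.mod (current + direction) 12) fuel

def zodiac_distance_inclusive (start : Int) (end_ : Int) (direction : Int) : Int :=
  if start = end_ then 1
  else zdLoop end_ direction 0 start 13

-- ===== PORT B =====
-- Python tuple GCD12; GCD12[d] with d = direction % 12 ∈ [0,12), so the index is always in range
def zdGCD12 : List Int := [12, 1, 2, 3, 4, 1, 6, 1, 4, 3, 2, 1]

-- port of Python's builtin pow(x, -1, m) (modular inverse, x, m ≥ 0, gcd(x,m)=1) via Bézout
def pyPowInv (x m : Int) : Int := PySem.Int.mod (Nat.gcdA x.toNat m.toNat) m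

def zd_closed (start end_ direction : Int) : Int :=
  let d := PySem.Int.mod direction 12
  let g := (PySem.List.pyGet? zdGCD12 d).getD 0
  let m := PySem.Int.floordiv 12 g
  let inv := pyPowInv (PySem.Int.floordiv d g) m
  let k := PySem.Int.mod (PySem.Int.floordiv (end_ - start) g * inv) m
  (if k ≠ 0 then k else m) + 1

def zodiac_distance_inclusive_alt (start : Int) (end_ : Int) (direction : Int) : Int :=
  if start = end_ then 1
  else zd_closed start end_ direction

-- ===== PRECONDITION & SPEC =====
-- Pre_ excludes exactly the inputs on which A's while-loop never terminates (start ≠ end and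
-- end is not reachable from start by repeated +direction steps mod 12); A returns on all of Pre_.
def Pre_zodiac_distance_inclusive (start : Int) (end_ : Int) (direction : Int) : Prop :=
  start = end_ ∨ (0 ≤ end_ ∧ end_ < 12 ∧ (Int.gcd direction 12 : Int) ∣ (end_ - start))
instance (start : Int) (end_ : Int) (direction : Int) : Decidable (Pre_zodiac_distance_inclusive start end_ direction) := by unfold Pre_zodiac_distance_inclusive; infer_instance
def pvWitness_zodiac_distance_inclusive : Int × Int × Int := (3, 7, 1)

def Spec_zodiac_distance_inclusive (start : Int) (end_ : Int) (direction : Int) (out : Int) : Prop := out = zodiac_distance_inclusive_alt start end_ direction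
instance (start : Int) (end_ : Int) (direction : Int) (out : Int) : Decidable (Spec_zodiac_distance_inclusive start end_ direction out) := by unfold Spec_zodiac_distance_inclusive; infer_instance

-- ===== CLAIM (what is proved, stated in full; the proofs are below) =====
def Claim_equal_zodiac_distance_inclusive : Prop := ∀ (start : Int) (end_ : Int) (direction : Int), Dom_zodiac_distance_inclusive start end_ direction → Pre_zodiac_distance_inclusive start end_ direction → Spec_zodiac_distance_inclusive start end_ direction (zodiac_distance_inclusive start end_ direction)

-- ===== LEMMAS AND PROOFS =====

theorem mod_bridge : ∀ a : Int, PySem.Int.mod a 12 = a % 12 := fun a =>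
  PySem.Int.mod_eq_emod_of_pos (by norm_num)

-- dist is a pure accumulator
theorem zdLoop_shift (end_ direction dist current : Int) (fuel : Nat) :
    zdLoop end_ direction dist current fuel = dist + zdLoop end_ direction 0 current fuel := by
  induction fuel generalizing dist current with
  | zero => simp [zdLoop]
  | succ n ih =>
      simp only [zdLoop]
      by_cases h : current = end_
      · simp [h]
      · simp only [h, if_false]
        rw [ih (dist + 1), ih (0 + 1)]
        ring

-- only direction % 12 matters to the loop
theorem zdLoop_dir_mod (end_ direction dist current : Int) (fuel : Nat) :
    zdLoop end_ direction dist current fuel = zdLoop end_ (direction % 12) dist current fuel := by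
  induction fuel generalizing dist current with
  | zero => rfl
  | succ n ih =>
      simp only [zdLoop]
      by_cases h : current = end_
      · simp [h]
      · simp only [h, if_false]
        rw [ih]
        congr 1
        simp only [mod_bridge]
        omega

-- the table is gcd
theorem zdGCD12_eq (d : Int) (h0 : 0 ≤ d) (h1 : d < 12) :
    (PySem.List.pyGet? zdGCD12 d).getD 0 = (Int.gcd d 12 : Int) := by
  interval_cases d <;> decide

-- zd_closed only sees direction through direction % 12
theorem zd_closed_dir_mod (start end_ direction : Int) :
    zd_closed start end_ direction = zd_closed start end_ (direction % 12) := by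
  simp only [zd_closed, mod_bridge, Int.emod_emod_of_dvd _ (dvd_refl (12 : Int))]

-- zd_closed is invariant under replacing start with start % 12
theorem zd_closed_start_mod (start end_ direction : Int) :
    zd_closed start end_ direction = zd_closed (start % 12) end_ direction := by
  have hd0 : 0 ≤ direction % 12 := Int.emod_nonneg _ (by norm_num)
  have hd1 : direction % 12 < 12 := Int.emod_lt_of_pos _ (by norm_num)
  have hgg : ((Int.gcd (direction % 12) 12 : Nat) : Int) = (Int.gcd direction 12 : Int) := by
    rw [Int.gcd_emod]
  have hgdvd12 : (Int.gcd direction 12 : Int) ∣ (12 : Int) := Int.gcd_dvd_right direction 12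
  have hgpos : 0 < (Int.gcd direction 12 : Int) := by
    have h0 : Int.gcd direction 12 ≠ 0 := by simp [Int.gcd_eq_zero_iff]
    exact_mod_cast Nat.pos_of_ne_zero h0
  obtain ⟨c, hc⟩ := hgdvd12
  have hcpos : 0 < c := by nlinarith
  have hm : (12 : Int) / (Int.gcd direction 12 : Int) = c := by
    nth_rewrite 1 [hc]
    rw [Int.mul_ediv_cancel_left _ (ne_of_gt hgpos)]
  have hmpos : 0 < (12 : Int) / (Int.gcd direction 12 : Int) := hm ▸ hcpos
  have hsplit : end_ - start % 12
      = (end_ - start) + (Int.gcd direction 12 : Int)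
          * ((12 / (Int.gcd direction 12 : Int)) * (start / 12)) := by
    rw [hm, ← mul_assoc, ← hc]
    omega
  simp only [zd_closed, mod_bridge, zdGCD12_eq _ hd0 hd1, hgg,
    PySem.Int.floordiv_eq_ediv_of_pos hgpos, PySem.Int.mod_eq_emod_of_pos hmpos]
  have hfd : (end_ - start % 12) / (Int.gcd direction 12 : Int)
      = (end_ - start) / (Int.gcd direction 12 : Int)
        + (12 / (Int.gcd direction 12 : Int)) * (start / 12) := by
    rw [hsplit, Int.add_mul_ediv_left _ _ (ne_of_gt hgpos)]
  rw [hfd, add_mul, mul_assoc, Int.add_mul_emod_self_left]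

-- the finite core: for canonical residues, one unrolled step plus the walk equals the closed form
theorem zd_key (s e d : Int) (hs0 : 0 ≤ s) (hs : s < 12) (he0 : 0 ≤ e) (he : e < 12)
    (hd0 : 0 ≤ d) (hd : d < 12) (hdvd : (Int.gcd d 12 : Int) ∣ (e - s)) :
    1 + zdLoop e d 0 (PySem.Int.mod (s + d) 12) 12 = zd_closed s e d := by
  interval_cases s <;> interval_cases e <;> interval_cases d <;>
    first
      | (exact absurd hdvd (by decide))
      | decide

-- ===== VERDICT (by name: the statement is the Claim_ definition above) =====
theorem zodiac_distance_inclusive_spec : Claim_equal_zodiac_distance_inclusive := by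
  intro start end_ direction _ hpre
  show zodiac_distance_inclusive start end_ direction = zodiac_distance_inclusive_alt start end_ direction
  by_cases h : start = end_
  · simp [zodiac_distance_inclusive, zodiac_distance_inclusive_alt, h]
  · rcases hpre with rfl | ⟨he0, he, hdvd⟩
    · exact absurd rfl h
    unfold zodiac_distance_inclusive zodiac_distance_inclusive_alt
    rw [if_neg h, if_neg h]
    -- unroll the first iteration of A's loop
    rw [show zdLoop end_ direction 0 start 13 =
        if start = end_ then (1:Int) else
          zdLoop end_ direction 1 (PySem.Int.mod (start + direction) 12) 12 from by
      simp [zdLoop]]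
    rw [if_neg h, zdLoop_shift, zdLoop_dir_mod]
    have harg : PySem.Int.mod (start + direction) 12
        = PySem.Int.mod (start % 12 + direction % 12) 12 := by
      simp only [mod_bridge]; omega
    rw [harg]
    have hs0 : 0 ≤ start % 12 := Int.emod_nonneg _ (by norm_num)
    have hs1 : start % 12 < 12 := Int.emod_lt_of_pos _ (by norm_num)
    have hd0 : 0 ≤ direction % 12 := Int.emod_nonneg _ (by norm_num)
    have hd1 : direction % 12 < 12 := Int.emod_lt_of_pos _ (by norm_num)
    have hg : ((Int.gcd (direction % 12) 12 : Nat) : Int) = (Int.gcd direction 12 : Int) := by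
      rw [Int.gcd_emod]
    have hg12 : (Int.gcd direction 12 : Int) ∣ (12 : Int) := Int.gcd_dvd_right direction 12
    have hdvd' : (Int.gcd (direction % 12) 12 : Int) ∣ (end_ - start % 12) := by
      rw [hg]
      have hsplit : end_ - start % 12 = (end_ - start) + 12 * (start / 12) := by
        omega
      rw [hsplit]
      exact dvd_add hdvd (Dvd.dvd.mul_right hg12 _)
    rw [zd_key (start % 12) end_ (direction % 12) hs0 hs1 he0 he hd0 hd1 hdvd',
      ← zd_closed_dir_mod, ← zd_closed_start_mod start end_ direction]
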